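-- pv_equiv track=rewrite | github.com/edytaroz/WDI | zad14wdi4vol2.py | zgodne
-- ===== SOURCE A (Python) =====
-- def zgodne(x,y):
--     count1 = 0
--     count2 = 0
--     while x > 0:
--         if x % 2 == 1:
--             count1 += 1
--         x = x // 2
--     while y > 0:
--         if y % 2 == 1:
--             count2 += 1
--         y = y // 2
--     if count1 == count2:
--         return True
--     return False
-- ===== SOURCE B (Python) =====
-- def zgodne(x, y):
--     count1 = 0
--     while x > 0:
--         x &= x - 1
--         count1 += 1
--     count2 = 0
--     while y > 0:
--         y &= y - 1
--         count2 += 1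
--     return count1 == count2
-- ===== Notes on version B (the rewrite author's own statement) =====
-- stated objective: alternative
-- what changed: Replaces the per-bit %2 / //2 scanning loops with Brian Kernighan's bit-clearing loop (x &= x-1 once per set bit), comparing the two popcounts.
import Mathlib
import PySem

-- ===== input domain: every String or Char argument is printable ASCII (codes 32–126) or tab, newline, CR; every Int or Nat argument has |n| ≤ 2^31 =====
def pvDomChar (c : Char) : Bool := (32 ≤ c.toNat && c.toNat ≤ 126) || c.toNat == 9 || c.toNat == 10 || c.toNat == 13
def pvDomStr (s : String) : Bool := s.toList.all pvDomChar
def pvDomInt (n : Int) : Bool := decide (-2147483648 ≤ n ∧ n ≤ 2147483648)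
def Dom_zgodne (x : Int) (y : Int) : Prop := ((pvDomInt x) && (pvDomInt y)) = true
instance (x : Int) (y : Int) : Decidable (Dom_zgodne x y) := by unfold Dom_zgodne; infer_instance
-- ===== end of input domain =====

-- ===== PORT A =====
-- B replaces the per-bit %2///2 scanning loops with Kernighan's x &= x-1 bit-clearing loop; objective: alternative (same cost class).

-- 'while x > 0: if x % 2 == 1: count += 1; x = x // 2' of A, state = (x, count)
def zgodneCountLoop (x : Int) (c : Int) : Int :=
  if 0 < x then
    zgodneCountLoop (PySem.Int.floordiv x 2) (if PySem.Int.mod x 2 = 1 then c + 1 else c)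
  else c
termination_by x.toNat
decreasing_by
  have h2 : PySem.Int.floordiv x 2 = x / 2 := PySem.Int.floordiv_eq_ediv_of_pos (by omega)
  rw [h2]; omega

def zgodne (x : Int) (y : Int) : Bool :=
  let count1 := zgodneCountLoop x 0
  let count2 := zgodneCountLoop y 0
  if count1 = count2 then true else false

-- helper fact cited by zgodneKernLoop's decreasing_by
theorem zgodne_land_toNat_lt (m : Nat) :
    (Int.land (Int.ofNat (m + 1)) (Int.ofNat (m + 1) - 1)).toNat < (Int.ofNat (m + 1)).toNat := by
  have hsub : Int.ofNat (m + 1) - 1 = Int.ofNat m := by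
    rw [Int.ofNat_eq_natCast, Int.ofNat_eq_natCast]; push_cast; ring
  rw [hsub]
  have heq : Int.land (Int.ofNat (m + 1)) (Int.ofNat m) = Int.ofNat ((m + 1) &&& m) := rfl
  rw [heq]
  have hle : (m + 1) &&& m ≤ m := Nat.and_le_right
  show ((m + 1) &&& m) < m + 1
  omega

-- ===== PORT B =====
-- 'while x > 0: x &= x - 1; count += 1' of B; Python's & on ints is Int.land (exact: the loop only reaches it with x > 0)
def zgodneKernLoop (x : Int) (c : Int) : Int :=
  if 0 < x then zgodneKernLoop (Int.land x (x - 1)) (c + 1)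
  else c
termination_by x.toNat
decreasing_by
  rcases x with n | n
  · rcases n with _ | m
    · simp at *
    · exact zgodne_land_toNat_lt m
  · simp [Int.negSucc_eq] at *; omega

def zgodne_alt (x : Int) (y : Int) : Bool :=
  let count1 := zgodneKernLoop x 0
  let count2 := zgodneKernLoop y 0
  count1 = count2

-- ===== PRECONDITION & SPEC =====
def Spec_zgodne (x : Int) (y : Int) (out : Bool) : Prop := out = zgodne_alt x y
instance (x : Int) (y : Int) (out : Bool) : Decidable (Spec_zgodne x y out) := by unfold Spec_zgodne; infer_instance

-- ===== CLAIM (what is proved, stated in full; the proofs are below) =====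
def Claim_equal_zgodne : Prop := ∀ (x : Int) (y : Int), Dom_zgodne x y → Spec_zgodne x y (zgodne x y)

-- ===== LEMMAS AND PROOFS =====

-- popcount on Nat, the common value of both loops' counters
def popAux (n : Nat) : Nat :=
  if n = 0 then 0 else popAux (n / 2) + n % 2
decreasing_by omega

theorem popAux_zero : popAux 0 = 0 := by rw [popAux]; simp

theorem popAux_pos (n : Nat) (h : n ≠ 0) : popAux n = popAux (n / 2) + n % 2 := by
  rw [popAux, if_neg h]

theorem popAux_two_mul (k : Nat) : popAux (2 * k) = popAux k := by
  rcases Nat.eq_zero_or_pos k with h | h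
  · simp [h, popAux_zero]
  · rw [popAux_pos (2 * k) (by omega)]
    have h1 : 2 * k / 2 = k := by omega
    have h2 : 2 * k % 2 = 0 := by omega
    rw [h1, h2]
    exact Nat.add_zero _

theorem popAux_two_mul_add_one (k : Nat) : popAux (2 * k + 1) = popAux k + 1 := by
  rw [popAux_pos (2 * k + 1) (by omega)]
  have h1 : (2 * k + 1) / 2 = k := by omega
  have h2 : (2 * k + 1) % 2 = 1 := by omega
  rw [h1, h2]

-- clearing the lowest set bit of an odd number yields its predecessor
theorem land_odd (n : Nat) (h : n % 2 = 1) : n &&& (n - 1) = n - 1 := by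
  apply Nat.eq_of_testBit_eq
  intro i
  rw [Nat.testBit_land]
  cases i with
  | zero =>
      rw [Nat.testBit_zero, Nat.testBit_zero]
      have : (n - 1) % 2 = 0 := by omega
      simp [this]
  | succ j =>
      simp only [Nat.testBit_succ]
      have : n / 2 = (n - 1) / 2 := by omega
      rw [this, Bool.and_self]

theorem land_even (k : Nat) (hk : 0 < k) : (2 * k) &&& (2 * k - 1) = 2 * (k &&& (k - 1)) := by
  apply Nat.eq_of_testBit_eq
  intro i
  rw [Nat.testBit_land]
  cases i with
  | zero =>
      simp only [Nat.testBit_zero]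
      have h1 : (2 * k) % 2 = 0 := by omega
      have h2 : (2 * (k &&& (k - 1))) % 2 = 0 := by omega
      simp [h1, h2]
  | succ j =>
      simp only [Nat.testBit_succ]
      have h1 : 2 * k / 2 = k := by omega
      have h2 : (2 * k - 1) / 2 = k - 1 := by omega
      have h3 : 2 * (k &&& (k - 1)) / 2 = k &&& (k - 1) := by omega
      rw [h1, h2, h3, Nat.testBit_land]

-- clearing the lowest set bit removes exactly one from popAux
theorem popAux_land_pred (n : Nat) (h : 0 < n) : popAux n = popAux (n &&& (n - 1)) + 1 := by
  induction n using Nat.strong_induction_on with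
  | _ n ih =>
    rcases Nat.even_or_odd n with ⟨k, hk⟩ | ⟨k, hk⟩
    · have hk2 : n = 2 * k := by omega
      have hkpos : 0 < k := by omega
      subst hk2
      rw [land_even k hkpos, popAux_two_mul, popAux_two_mul, ih k (by omega) hkpos]
    · subst hk
      rw [land_odd (2 * k + 1) (by omega)]
      have : 2 * k + 1 - 1 = 2 * k := by omega
      rw [this, popAux_two_mul, popAux_two_mul_add_one]

-- A's loop computes c + popAux n on nonnegative inputs
theorem countLoop_eq (n : Nat) : ∀ c : Int, zgodneCountLoop (n : Int) c = c + (popAux n : Int) := by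
  induction n using Nat.strong_induction_on with
  | _ n ih =>
    intro c
    rw [zgodneCountLoop]
    rcases Nat.eq_zero_or_pos n with h0 | h0
    · subst h0; simp [popAux_zero]
    · have hpos : (0 : Int) < (n : Int) := by exact_mod_cast h0
      rw [if_pos hpos]
      have hfd : PySem.Int.floordiv (n : Int) 2 = ((n / 2 : Nat) : Int) := by
        exact_mod_cast PySem.Int.floordiv_natCast n 2
      have hmd : PySem.Int.mod (n : Int) 2 = ((n % 2 : Nat) : Int) := by
        exact_mod_cast PySem.Int.mod_natCast n 2
      rw [hfd, hmd, ih (n / 2) (by omega)]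
      have hpop : (popAux n : Int) = (popAux (n / 2) : Int) + (n % 2 : Nat) := by
        rw [popAux_pos n (by omega)]; push_cast; ring
      rw [hpop]
      by_cases hodd : n % 2 = 1
      · rw [if_pos (by exact_mod_cast hodd), hodd]; push_cast; ring
      · have h2 : n % 2 = 0 := by omega
        rw [if_neg (by rw [h2]; exact_mod_cast (by decide : ¬ ((0:Nat):Int) = 1)), h2]
        push_cast; ring

-- B's loop computes c + popAux n on nonnegative inputs
theorem kernLoop_eq (n : Nat) : ∀ c : Int, zgodneKernLoop (n : Int) c = c + (popAux n : Int) := by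
  induction n using Nat.strong_induction_on with
  | _ n ih =>
    intro c
    rw [zgodneKernLoop]
    rcases Nat.eq_zero_or_pos n with h0 | h0
    · subst h0; simp [popAux_zero]
    · have hpos : (0 : Int) < (n : Int) := by exact_mod_cast h0
      rw [if_pos hpos]
      have hland : Int.land (n : Int) ((n : Int) - 1) = ((n &&& (n - 1) : Nat) : Int) := by
        rcases n with _ | m
        · omega
        · have hsub : ((m + 1 : Nat) : Int) - 1 = ((m : Nat) : Int) := by push_cast; ring
          rw [hsub]
          show Int.ofNat ((m + 1) &&& m) = ((m + 1 &&& (m + 1 - 1) : Nat) : Int)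
          rfl
      rw [hland]
      have hlt : n &&& (n - 1) < n := by
        have : n &&& (n - 1) ≤ n - 1 := Nat.and_le_right
        omega
      rw [ih (n &&& (n - 1)) hlt, popAux_land_pred n h0]
      push_cast; ring

theorem loops_eq (x : Int) (c : Int) : zgodneCountLoop x c = zgodneKernLoop x c := by
  rcases x with n | n
  · rw [Int.ofNat_eq_natCast, countLoop_eq, kernLoop_eq]
  · rw [zgodneCountLoop, zgodneKernLoop]
    have h : ¬ (0 : Int) < Int.negSucc n := by
      rw [Int.negSucc_eq]; omega
    rw [if_neg h, if_neg h]

-- ===== VERDICT (by name: the statement is the Claim_ definition above) =====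
theorem zgodne_spec : Claim_equal_zgodne := by
  intro x y _
  unfold Spec_zgodne zgodne zgodne_alt
  rw [loops_eq x 0, loops_eq y 0]
  by_cases h : zgodneKernLoop x 0 = zgodneKernLoop y 0
  · simp [h]
  · simp [h]
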